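-- pv_equiv track=rewrite | github.com/haphaeu/AOC2023 | day12.py | gen_all_combinations_mask
-- ===== SOURCE A (Python) =====
-- def gen_all_combinations_mask(mask):
--     # ..#??.##?#  => 001??011?1
--     length = mask.count("?")
--     for i in range(0, 2**length):
--         fill = bin(i)[2:].zfill(length).replace("0", ".").replace("1", "#")
--         combination = ""
--         for c in mask:
--             if c == "?":
--                 combination += fill[0]
--                 fill = fill[1:]
--             else:
--                 combination += c
--         yield combination
-- ===== SOURCE B (Python) =====
-- def gen_all_combinations_mask(mask):
--     # Split the mask at its '?'s into fixed segments, then iteratively grow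
--     # the list of all combinations segment by segment: each '?' splits every
--     # partial combination into its '.' and '#' extensions ('.' first), so the
--     # final list is in exactly the order A enumerates.
--     parts = mask.split("?")
--     combos = [parts[0]]
--     for part in parts[1:]:
--         combos = [p + f + part for p in combos for f in ".#"]
--     yield from combos
-- ===== Notes on version B (the rewrite author's own statement) =====
-- stated objective: faster
-- what changed: Replaces A's counting over range(2**length) with per-index binary-string decoding (bin/zfill/replace plus a full substitution pass over the mask for every combination) by splitting the mask once at the wildcards and iteratively growing the combination list segment by segment, branching to dot then hash at each wildcard, which yields the same combinations in the same order.
import Mathlib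
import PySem

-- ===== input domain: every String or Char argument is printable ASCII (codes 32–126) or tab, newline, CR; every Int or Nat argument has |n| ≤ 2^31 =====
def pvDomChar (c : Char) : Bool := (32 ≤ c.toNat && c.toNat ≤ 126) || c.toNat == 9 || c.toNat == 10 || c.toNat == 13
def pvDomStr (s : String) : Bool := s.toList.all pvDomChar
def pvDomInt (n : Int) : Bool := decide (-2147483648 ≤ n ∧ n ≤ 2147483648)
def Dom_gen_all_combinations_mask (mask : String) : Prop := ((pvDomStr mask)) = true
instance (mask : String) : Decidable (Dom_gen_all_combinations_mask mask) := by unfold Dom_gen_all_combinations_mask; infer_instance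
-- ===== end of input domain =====

-- B replaces A's integer-counting + binary-string decoding by splitting the mask
-- at '?' and iteratively growing the combination list ('.' before '#'), same output.
-- Both Pythons are generators; the ports return the yielded values as a list.

-- ===== PORT A =====

-- bin(n)[2:] for n ≥ 1, built exactly as Python's binary representation
-- (most significant digit first); binNat 0 = [] (bin(0)[2:] is handled by binStr).
def binNat : Nat → List Char
  | 0 => []
  | (n+1) => binNat ((n+1) / 2) ++ [if (n+1) % 2 = 1 then '1' else '0']
decreasing_by exact Nat.div_lt_self (Nat.succ_pos n) (by norm_num)

-- bin(i)[2:] : Python prints one digit '0' for i = 0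
def binStr (i : Nat) : List Char := if i = 0 then ['0'] else binNat i

-- str.zfill(k): left-pad with '0' to length k (never truncates)
def zfill (l : List Char) (k : Nat) : List Char := List.replicate (k - l.length) '0' ++ l

-- .replace("0", ".").replace("1", "#") applied to a string of binary digits:
-- the two sequential single-char replaces are exactly this character map.
def repDots (l : List Char) : List Char :=
  l.map (fun c => if c = '0' then '.' else if c = '1' then '#' else c)

-- inner 'for c in mask' loop: state = (combination so far, remaining fill).
-- A '?' with empty fill would be Python's IndexError; it is unreachable
-- (fill always has ≥ count '?' characters), the port keeps the state unchanged there.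
def substStep (st : List Char × List Char) (c : Char) : List Char × List Char :=
  if c = '?' then
    match st.2 with
    | f :: fs => (st.1 ++ [f], fs)
    | [] => (st.1, [])
  else (st.1 ++ [c], st.2)

def gen_all_combinations_mask (mask : String) : List String :=
  let length := mask.toList.count '?'
  (List.range (2 ^ length)).map (fun i =>
    let fill := repDots (zfill (binStr i) length)
    String.mk (mask.toList.foldl substStep ([], fill)).1)

-- ===== PORT B =====

-- one step of B's loop: extend every combination by '.' or '#' and the next segment
def genStep (combos : List (List Char)) (part : List Char) : List (List Char) :=
  combos.flatMap (fun p => ['.', '#'].map (fun f => p ++ f :: part))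

-- Python's str.split with the one-char separator "?" is exactly List.splitOn '?'
-- on the code points (empty pieces kept, [""] on the empty string).
def gen_all_combinations_mask_alt (mask : String) : List String :=
  let parts := mask.toList.splitOn '?'
  ((parts.drop 1).foldl genStep [parts.headD []]).map String.mk

-- ===== PRECONDITION & SPEC =====
def Spec_gen_all_combinations_mask (mask : String) (out : List String) : Prop := out = gen_all_combinations_mask_alt mask
instance (mask : String) (out : List String) : Decidable (Spec_gen_all_combinations_mask mask out) := by unfold Spec_gen_all_combinations_mask; infer_instance

-- ===== CLAIM (what is proved, stated in full; the proofs are below) =====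
def Claim_equal_gen_all_combinations_mask : Prop := ∀ (mask : String), Dom_gen_all_combinations_mask mask → Spec_gen_all_combinations_mask mask (gen_all_combinations_mask mask)

-- ===== LEMMAS AND PROOFS =====

-- proof-side bridge: suffix-combinations, recursively
def genCore : List Char → List (List Char)
  | [] => [[]]
  | c :: cs =>
      (if c = '?' then ['.', '#'] else [c]).flatMap
        (fun o => (genCore cs).map (fun tail => o :: tail))

-- combinations contributed by the segments after the first: choose '.' or '#'
-- before each segment, leftmost choice most significant
def rest : List (List Char) → List (List Char)
  | [] => [[]]
  | part :: ps => ['.', '#'].flatMap (fun f => (rest ps).map (fun t => f :: part ++ t))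

-- B's fold grows every combination by the choices over the remaining segments
theorem foldl_genStep (ps : List (List Char)) : ∀ (combos : List (List Char)),
    ps.foldl genStep combos = combos.flatMap (fun p => (rest ps).map (fun t => p ++ t)) := by
  induction ps with
  | nil => intro combos; simp [rest]
  | cons part ps ih =>
      intro combos
      rw [List.foldl_cons, ih]
      simp only [genStep, List.flatMap_assoc, List.flatMap_map]
      apply List.flatMap_congr
      intro p hp
      simp [rest, List.map_map, Function.comp]
      rfl

-- splitting at '?' and re-growing is the suffix-combination recursion
theorem genCore_eq_split (cs : List Char) :
    genCore cs = (rest ((cs.splitOn '?').drop 1)).map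
      (fun t => (cs.splitOn '?').headD [] ++ t) := by
  induction cs with
  | nil => simp [genCore, List.splitOn, List.splitOnP_nil, rest]
  | cons c cs ih =>
      obtain ⟨h, t, hht⟩ := List.exists_cons_of_ne_nil (List.splitOnP_ne_nil (· == '?') cs)
      by_cases hc : c = '?'
      · subst hc
        have hsplit : ('?' :: cs).splitOn '?' = [] :: cs.splitOn '?' := by
          simp [List.splitOn, List.splitOnP_cons]
        rw [hsplit]
        simp only [List.headD_cons, List.drop_succ_cons, List.drop_zero]
        rw [show cs.splitOn '?' = h :: t from hht] at ih ⊢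
        simp only [List.headD_cons, List.drop_succ_cons, List.drop_zero] at ih
        simp [genCore, ih, rest, List.map_map, Function.comp]
        rfl
      · have hsplit : (c :: cs).splitOn '?' = (cs.splitOn '?').modifyHead (fun l => c :: l) := by
          simp [List.splitOn, List.splitOnP_cons, hc]
        rw [hsplit]
        rw [show cs.splitOn '?' = h :: t from hht] at ih ⊢
        simp only [List.headD_cons, List.drop_succ_cons, List.drop_zero] at ih
        simp [genCore, hc, ih, List.map_map, Function.comp, List.modifyHead]

theorem foldl_genStep_split (cs : List Char) :
    ((cs.splitOn '?').drop 1).foldl genStep [(cs.splitOn '?').headD []] = genCore cs := by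
  rw [foldl_genStep, genCore_eq_split]
  simp

-- recursive form of A's inner fold
def subst : List Char → List Char → List Char
  | [], _ => []
  | c :: cs, fill =>
      if c = '?' then
        match fill with
        | f :: fs => f :: subst cs fs
        | [] => subst cs []
      else c :: subst cs fill

theorem foldl_substStep (cs : List Char) : ∀ (acc fill : List Char),
    (cs.foldl substStep (acc, fill)).1 = acc ++ subst cs fill := by
  induction cs with
  | nil => intro acc fill; simp [subst]
  | cons c cs ih =>
      intro acc fill
      by_cases h : c = '?'
      · cases fill with
        | nil => simp [substStep, subst, h, ih]
        | cons f fs => simp [substStep, subst, h, ih]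
      · simp [substStep, subst, h, ih]

-- exact k-digit binary string of i (MSB first), i < 2^k
def bits01 : Nat → Nat → List Char
  | 0, _ => []
  | (k+1), i => (if 2 ^ k ≤ i then '1' else '0') :: bits01 k (i % 2 ^ k)

theorem length_bits01 (k : Nat) : ∀ i, (bits01 k i).length = k := by
  induction k with
  | zero => intro i; simp [bits01]
  | succ k ih => intro i; simp [bits01, ih]

theorem length_binNat : ∀ i k, i < 2 ^ k → (binNat i).length ≤ k := by
  intro i
  induction i using Nat.strong_induction_on with
  | _ i ih =>
    intro k hk
    match i, k with
    | 0, k => simp [binNat]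
    | (n+1), 0 => omega
    | (n+1), (k+1) =>
      rw [binNat]
      have h2 : (n+1)/2 < n+1 := Nat.div_lt_self (Nat.succ_pos n) (by norm_num)
      have hlt : (n+1)/2 < 2 ^ k := by
        rw [Nat.div_lt_iff_lt_mul (by norm_num)]
        have h2 : (2:Nat) ^ (k+1) = 2 ^ k * 2 := by ring
        omega
      have := ih _ h2 k hlt
      simp [List.length_append]; omega

-- LSB-peeling for bits01
theorem bits01_succ (k : Nat) : ∀ r, r < 2 ^ (k+1) →
    bits01 (k+1) r = bits01 k (r / 2) ++ [if r % 2 = 1 then '1' else '0'] := by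
  induction k with
  | zero =>
      intro r hr
      interval_cases r <;> simp [bits01]
  | succ k ih =>
      intro r hr
      have hmod : r % 2 ^ (k+1) < 2 ^ (k+1) := Nat.mod_lt _ (Nat.pow_pos (by norm_num))
      have e1 : (2 ^ (k+1) ≤ r) ↔ (2 ^ k ≤ r / 2) := by
        rw [Nat.le_div_iff_mul_le (by norm_num)]
        constructor <;> intro h
        · calc 2 ^ k * 2 = 2 ^ (k+1) := by ring
            _ ≤ r := h
        · calc 2 ^ (k+1) = 2 ^ k * 2 := by ring
            _ ≤ r := h
      have e2 : r % 2 ^ (k+1) / 2 = r / 2 % 2 ^ k := by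
        rw [pow_succ']
        exact Nat.mod_mul_right_div_self r 2 (2 ^ k)
      have e3 : r % 2 ^ (k+1) % 2 = r % 2 := by
        apply Nat.mod_mod_of_dvd
        exact ⟨2 ^ k, by ring⟩
      rw [bits01, ih _ hmod, e2, e3, bits01]
      by_cases h : 2 ^ (k+1) ≤ r
      · rw [if_pos h, if_pos (e1.mp h)]; simp
      · rw [if_neg h, if_neg (fun hh => h (e1.mpr hh))]; simp

theorem binNat_pow_add (k : Nat) : ∀ r, r < 2 ^ k → binNat (2 ^ k + r) = '1' :: bits01 k r := by
  induction k with
  | zero =>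
      intro r hr
      have : r = 0 := by omega
      subst this
      simp only [pow_zero, Nat.add_zero]
      rw [show (1:Nat) = 0 + 1 from rfl, binNat]
      simp [binNat, bits01]
  | succ k ih =>
      intro r hr
      have hpos : 0 < 2 ^ (k+1) + r := by positivity
      obtain ⟨m, hm⟩ : ∃ m, 2 ^ (k+1) + r = m + 1 := ⟨2 ^ (k+1) + r - 1, by omega⟩
      rw [hm, binNat, ← hm]
      have h2 : (2:Nat) ^ (k+1) = 2 ^ k * 2 := by ring
      have hdiv : (2 ^ (k+1) + r) / 2 = 2 ^ k + r / 2 := by omega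
      have hmod : (2 ^ (k+1) + r) % 2 = r % 2 := by omega
      have hr2 : r / 2 < 2 ^ k := by
        rw [Nat.div_lt_iff_lt_mul (by norm_num)]
        calc r < 2 ^ (k+1) := hr
          _ = 2 ^ k * 2 := by ring
      rw [hdiv, hmod, ih _ hr2, bits01_succ k r hr]
      simp

-- zfill(bin(i)) produces exactly the k-digit binary string, for k ≥ 1
theorem zfill_binStr (k : Nat) : ∀ i, i < 2 ^ (k+1) →
    zfill (binStr i) (k+1) = bits01 (k+1) i := by
  induction k with
  | zero =>
      intro i hi
      interval_cases i <;> simp [binStr, binNat, zfill, bits01]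
  | succ k ih =>
      intro i hi
      by_cases h : 2 ^ (k+1) ≤ i
      · -- leading digit 1: bin(i) already has k+2 digits
        obtain ⟨r, hr, rfl⟩ : ∃ r, r < 2 ^ (k+1) ∧ i = 2 ^ (k+1) + r := by
          refine ⟨i - 2 ^ (k+1), by
            have : (2:Nat) ^ (k+1+1) = 2 ^ (k+1) * 2 := by ring
            omega, by omega⟩
        have hne : 2 ^ (k+1) + r ≠ 0 := by positivity
        rw [binStr, if_neg hne, binNat_pow_add (k+1) r hr]
        have hlen : ('1' :: bits01 (k+1) r).length = k + 2 := by
          simp [length_bits01]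
        rw [zfill, hlen]
        have hmod : (2 ^ (k+1) + r) % 2 ^ (k+1) = r := by
          rw [Nat.add_mod_left, Nat.mod_eq_of_lt hr]
        rw [show bits01 (k+1+1) (2 ^ (k+1) + r) = _ :: _ from rfl, hmod, if_pos h]
        simp
      · -- leading digit 0: pad one more '0' and recurse
        push_neg at h
        have hlen : (binStr i).length ≤ k + 1 := by
          by_cases h0 : i = 0
          · subst h0; simp [binStr]
          · rw [binStr, if_neg h0]; exact length_binNat i (k+1) h
        have hmod : i % 2 ^ (k+1) = i := Nat.mod_eq_of_lt h
        rw [show bits01 (k+1+1) i = _ :: _ from rfl, hmod, if_neg (by omega)]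
        rw [← ih i h]
        rw [zfill, zfill]
        have : (k + 1 + 1) - (binStr i).length = ((k+1) - (binStr i).length) + 1 := by omega
        rw [this, List.replicate_succ]
        simp

-- subst on a mask with no '?' ignores the fill
theorem subst_no_q (cs : List Char) : ∀ fill, cs.count '?' = 0 → subst cs fill = cs := by
  induction cs with
  | nil => intro fill _; simp [subst]
  | cons c cs ih =>
      intro fill h
      have hc : c ≠ '?' := by
        intro hc; subst hc; simp at h
      have hcs : cs.count '?' = 0 := by
        rw [List.count_cons] at h; omega
      simp [subst, hc, ih _ hcs]

-- the fill A computes for i, with q := count '?'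
def fillOf (i q : Nat) : List Char := repDots (zfill (binStr i) q)

theorem fillOf_eq (q : Nat) (hq : 1 ≤ q) (i : Nat) (hi : i < 2 ^ q) :
    fillOf i q = repDots (bits01 q i) := by
  obtain ⟨k, rfl⟩ : ∃ k, q = k + 1 := ⟨q - 1, by omega⟩
  rw [fillOf, zfill_binStr k i hi]

-- subst against the k-digit fill, factored through bits01, equals subst against A's fill
theorem subst_fillOf (cs : List Char) (i : Nat) (hi : i < 2 ^ cs.count '?') :
    subst cs (fillOf i (cs.count '?')) = subst cs (repDots (bits01 (cs.count '?') i)) := by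
  by_cases h : cs.count '?' = 0
  · rw [subst_no_q cs _ h, subst_no_q cs _ h]
  · rw [fillOf_eq _ (by omega) i hi]

-- main lemma: A's enumeration equals B's recursion, over char lists
theorem main_lemma (cs : List Char) :
    (List.range (2 ^ cs.count '?')).map (fun i => subst cs (fillOf i (cs.count '?'))) =
      genCore cs := by
  induction cs with
  | nil => simp [subst, genCore]
  | cons c cs ih =>
    by_cases hc : c = '?'
    · subst hc
      have hq : ('?' :: cs).count '?' = cs.count '?' + 1 := by simp
      rw [hq]
      have hsplit : (2:Nat) ^ (cs.count '?' + 1) = 2 ^ cs.count '?' + 2 ^ cs.count '?' := by ring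
      rw [hsplit, List.range_add, List.map_append, List.map_map]
      have hL : ∀ i ∈ List.range (2 ^ cs.count '?'),
          subst ('?' :: cs) (fillOf i (cs.count '?' + 1)) =
            '.' :: subst cs (fillOf i (cs.count '?')) := by
        intro i hi
        rw [List.mem_range] at hi
        have hi1 : i < 2 ^ (cs.count '?' + 1) := by
          have : (2:Nat) ^ (cs.count '?' + 1) = 2 ^ cs.count '?' * 2 := by ring
          omega
        rw [fillOf_eq _ (by omega) i hi1]
        have hmod : i % 2 ^ cs.count '?' = i := Nat.mod_eq_of_lt hi
        rw [show bits01 (cs.count '?' + 1) i = _ :: _ from rfl, hmod, if_neg (by omega)]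
        rw [subst_fillOf cs i hi]
        simp [repDots, subst]
      have hR : ∀ i ∈ List.range (2 ^ cs.count '?'),
          subst ('?' :: cs) (fillOf (2 ^ cs.count '?' + i) (cs.count '?' + 1)) =
            '#' :: subst cs (fillOf i (cs.count '?')) := by
        intro i hi
        rw [List.mem_range] at hi
        have hi1 : 2 ^ cs.count '?' + i < 2 ^ (cs.count '?' + 1) := by
          have : (2:Nat) ^ (cs.count '?' + 1) = 2 ^ cs.count '?' * 2 := by ring
          omega
        rw [fillOf_eq _ (by omega) _ hi1]
        have hmod : (2 ^ cs.count '?' + i) % 2 ^ cs.count '?' = i := by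
          rw [Nat.add_mod_left, Nat.mod_eq_of_lt hi]
        rw [show bits01 (cs.count '?' + 1) (2 ^ cs.count '?' + i) = _ :: _ from rfl, hmod,
          if_pos (by omega)]
        rw [subst_fillOf cs i hi]
        simp [repDots, subst]
      have e1 : (List.range (2 ^ cs.count '?')).map
            (fun i => subst ('?' :: cs) (fillOf i (cs.count '?' + 1))) =
          (genCore cs).map (fun t => '.' :: t) := by
        rw [← ih, List.map_map]
        refine List.map_congr_left ?_
        intro i hi
        simpa using hL i hi
      have e2 : (List.range (2 ^ cs.count '?')).map
            ((fun i => subst ('?' :: cs) (fillOf i (cs.count '?' + 1))) ∘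
              (fun x => 2 ^ cs.count '?' + x)) =
          (genCore cs).map (fun t => '#' :: t) := by
        rw [← ih, List.map_map]
        refine List.map_congr_left ?_
        intro i hi
        simpa [Function.comp] using hR i hi
      rw [e1, e2]
      simp [genCore]
    · have hq : (c :: cs).count '?' = cs.count '?' := by
        simp [List.count_cons, hc]
      rw [hq]
      have hmap : ∀ i ∈ List.range (2 ^ cs.count '?'),
          subst (c :: cs) (fillOf i (cs.count '?')) =
            c :: subst cs (fillOf i (cs.count '?')) := by
        intro i _
        simp [subst, hc]
      rw [List.map_congr_left hmap]
      rw [show genCore (c :: cs) = (genCore cs).map (fun t => c :: t) by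
        simp [genCore, hc]]
      rw [← ih, List.map_map]
      rfl

-- ===== VERDICT (by name: the statement is the Claim_ definition above) =====
theorem gen_all_combinations_mask_spec : Claim_equal_gen_all_combinations_mask := by
  intro mask _
  unfold Spec_gen_all_combinations_mask
  show gen_all_combinations_mask mask = gen_all_combinations_mask_alt mask
  simp only [gen_all_combinations_mask, gen_all_combinations_mask_alt]
  rw [foldl_genStep_split, ← main_lemma mask.toList]
  simp only [List.map_map]
  apply List.map_congr_left
  intro i _
  simp [foldl_substStep, fillOf]
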